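-- pv_equiv track=rewrite | github.com/znoasdn/Free-capstone-design2025 | validators/base_validator.py | _is_sequential
-- ===== SOURCE A (Python) =====
-- def _is_sequential(digits: str) -> bool:
--     """연속 증가 또는 감소하는 숫자인지 확인"""
--     if len(digits) < 6:
--         return False
--
--     # 연속 증가 확인
--     is_ascending = True
--     is_descending = True
--
--     for i in range(1, len(digits)):
--         curr = int(digits[i])
--         prev = int(digits[i-1])
--
--         # 증가 체크 (0 다음 1, 9 다음 0 허용)
--         expected_next = (prev + 1) % 10
--         if curr != expected_next:
--             is_ascending = False
--
--         # 감소 체크 (1 다음 0, 0 다음 9 허용)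
--         expected_prev = (prev - 1) % 10
--         if curr != expected_prev:
--             is_descending = False
--
--         # 둘 다 아니면 조기 종료
--         if not is_ascending and not is_descending:
--             return False
--
--     return is_ascending or is_descending
-- ===== SOURCE B (Python) =====
-- def _is_sequential(digits: str) -> bool:
--     if len(digits) < 6:
--         return False
--     # generate-and-compare: build the unique ascending and descending candidate
--     # strings that start with digits[0], then test digits against them
--     n = len(digits)
--     start = int(digits[0])
--     ascending = ''.join(str((start + k) % 10) for k in range(n))
--     descending = ''.join(str((start - k) % 10) for k in range(n))
--     return digits == ascending or digits == descending
-- ===== Notes on version B (the rewrite author's own statement) =====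
-- stated objective: alternative
-- what changed: B is generate-and-compare: instead of scanning adjacent pairs with two boolean direction flags, it constructs the unique ascending and the unique descending candidate strings starting with digits[0] and tests the input for string equality against them.
-- outside the precondition, e.g. on _is_sequential('19a456'): A returns False, B returns False
import Mathlib
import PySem

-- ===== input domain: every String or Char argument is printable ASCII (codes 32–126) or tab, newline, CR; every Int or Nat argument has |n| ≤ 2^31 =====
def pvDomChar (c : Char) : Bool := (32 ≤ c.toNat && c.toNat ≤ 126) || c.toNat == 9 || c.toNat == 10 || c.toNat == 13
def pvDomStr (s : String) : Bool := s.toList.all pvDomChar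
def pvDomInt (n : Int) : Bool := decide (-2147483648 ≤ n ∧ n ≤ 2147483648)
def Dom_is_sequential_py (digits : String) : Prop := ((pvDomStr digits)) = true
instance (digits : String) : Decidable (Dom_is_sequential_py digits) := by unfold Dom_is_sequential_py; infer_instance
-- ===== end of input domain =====

-- B is generate-and-compare: it builds the unique ascending and descending candidate strings
-- from digits[0] and tests the input for equality against them; same O(n) cost, different algorithm.

-- int(ch) for one character; the default 0 is never reached under Pre_ (Python raises ValueError there)
def pvDigit (c : Char) : Int := (PySem.Int.ofStr? (String.ofList [c])).getD 0

-- ===== PORT A =====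
def loopA (l : List Char) : List Nat → Bool → Bool → Bool
  | [], asc, desc => asc || desc
  | i :: rest, asc, desc =>
    let curr := pvDigit (l.getD i ' ')
    let prev := pvDigit (l.getD (i - 1) ' ')
    let asc' := if curr ≠ PySem.Int.mod (prev + 1) 10 then false else asc
    let desc' := if curr ≠ PySem.Int.mod (prev - 1) 10 then false else desc
    if !asc' && !desc' then false else loopA l rest asc' desc'

def is_sequential_py (digits : String) : Bool :=
  let l := digits.toList
  if l.length < 6 then false
  else loopA l (List.range' 1 (l.length - 1)) true true

-- ===== PORT B =====
def is_sequential_py_alt (digits : String) : Bool :=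
  let l := digits.toList
  if l.length < 6 then false
  else
    let n := l.length
    let start := pvDigit (l.getD 0 ' ')
    let ascending := (List.range n).flatMap (fun (k : Nat) => (PySem.Int.toStr (PySem.Int.mod (start + (k:Int)) 10)).toList)
    let descending := (List.range n).flatMap (fun (k : Nat) => (PySem.Int.toStr (PySem.Int.mod (start - (k:Int)) 10)).toList)
    l == ascending || l == descending

-- ===== PRECONDITION & SPEC =====
-- Pre_ excludes strings of length ≥ 6 containing a non-digit character: on those Python's
-- int() raises ValueError at the first non-digit the loop reaches (A only returns there when
-- an earlier pair already failed both directions, and B returns the same False then).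
def Pre_is_sequential_py (digits : String) : Prop :=
  digits.toList.length < 6 ∨ digits.toList.all Char.isDigit = true
instance (digits : String) : Decidable (Pre_is_sequential_py digits) := by
  unfold Pre_is_sequential_py; infer_instance

def pvWitness_is_sequential_py : String := "123456"

def Spec_is_sequential_py (digits : String) (out : Bool) : Prop := out = is_sequential_py_alt digits
instance (digits : String) (out : Bool) : Decidable (Spec_is_sequential_py digits out) := by
  unfold Spec_is_sequential_py; infer_instance

-- ===== CLAIM (what is proved, stated in full; the proofs are below) =====
def Claim_equal_is_sequential_py : Prop := ∀ (digits : String), Dom_is_sequential_py digits → Pre_is_sequential_py digits → Spec_is_sequential_py digits (is_sequential_py digits)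

-- ===== LEMMAS AND PROOFS =====

-- helper used only by the proofs: the step (d[i]-d[i-1]) mod 10
def deltaAt (l : List Char) (i : Nat) : Int :=
  PySem.Int.mod (pvDigit (l.getD i ' ') - pvDigit (l.getD (i - 1) ' ')) 10

lemma pvDigit_eq (c : Char) (h : c.isDigit = true) :
    pvDigit c = (c.toNat : Int) - 48 := by
  have hb : 48 ≤ c.toNat ∧ c.toNat ≤ 57 := by
    simp [Char.isDigit, decide_eq_true_eq] at h
    exact ⟨h.1, h.2⟩
  have hc := Char.ofNat_toNat c
  obtain ⟨h1, h2⟩ := hb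
  interval_cases h3 : c.toNat <;> rw [← hc] <;> decide

lemma pvDigit_bounds (c : Char) (h : c.isDigit = true) :
    0 ≤ pvDigit c ∧ pvDigit c ≤ 9 := by
  have hb : 48 ≤ c.toNat ∧ c.toNat ≤ 57 := by
    simp [Char.isDigit, decide_eq_true_eq] at h
    exact ⟨h.1, h.2⟩
  rw [pvDigit_eq c h]; omega

lemma mod10 (x : Int) : PySem.Int.mod x 10 = x % 10 :=
  PySem.Int.mod_eq_emod_of_pos (by norm_num)

lemma step_asc (p q : Int) (_hp0 : 0 ≤ p) (_hp9 : p ≤ 9) (hq0 : 0 ≤ q) (hq9 : q ≤ 9) :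
    (q == PySem.Int.mod (p + 1) 10) = (PySem.Int.mod (q - p) 10 == 1) := by
  rw [mod10, mod10]
  refine Bool.eq_iff_iff.mpr ?_
  simp only [beq_iff_eq]
  constructor <;> intro h <;> omega

lemma step_desc (p q : Int) (_hp0 : 0 ≤ p) (_hp9 : p ≤ 9) (hq0 : 0 ≤ q) (hq9 : q ≤ 9) :
    (q == PySem.Int.mod (p - 1) 10) = (PySem.Int.mod (q - p) 10 == 9) := by
  rw [mod10, mod10]
  refine Bool.eq_iff_iff.mpr ?_
  simp only [beq_iff_eq]
  constructor <;> intro h <;> omega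

lemma if_flag (q e : Int) (b : Bool) : (if q ≠ e then false else b) = (b && (q == e)) := by
  by_cases h : q = e <;> simp [h]

lemma loopA_eq (l : List Char) (is : List Nat)
    (hb : ∀ i ∈ is, (0 ≤ pvDigit (l.getD i ' ') ∧ pvDigit (l.getD i ' ') ≤ 9) ∧
                    (0 ≤ pvDigit (l.getD (i - 1) ' ') ∧ pvDigit (l.getD (i - 1) ' ') ≤ 9))
    (asc desc : Bool) :
    loopA l is asc desc =
      ((asc && is.all (fun i => deltaAt l i == 1)) ||
       (desc && is.all (fun i => deltaAt l i == 9))) := by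
  induction is generalizing asc desc with
  | nil => simp [loopA]
  | cons i rest ih =>
    obtain ⟨⟨hc0, hc9⟩, ⟨hp0, hp9⟩⟩ := hb i (List.mem_cons_self ..)
    have hrest := fun j hj => hb j (List.mem_cons_of_mem _ hj)
    have hA : (if pvDigit (l.getD i ' ') ≠ PySem.Int.mod (pvDigit (l.getD (i - 1) ' ') + 1) 10
               then false else asc) = (asc && (deltaAt l i == 1)) := by
      simp only [deltaAt]
      rw [if_flag, step_asc _ _ hp0 hp9 hc0 hc9]
    have hD : (if pvDigit (l.getD i ' ') ≠ PySem.Int.mod (pvDigit (l.getD (i - 1) ' ') - 1) 10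
               then false else desc) = (desc && (deltaAt l i == 9)) := by
      simp only [deltaAt]
      rw [if_flag, step_desc _ _ hp0 hp9 hc0 hc9]
    show (if _ then false else loopA l rest _ _) = _
    rw [hA, hD, ih hrest]
    cases asc <;> cases desc <;>
      cases h1 : (deltaAt l i == 1) <;> cases h9 : (deltaAt l i == 9) <;>
      simp [h1, h9, List.all_cons]

-- str(v) for a one-digit value is the single character with code 48+v
lemma toStr_digit (v : Int) (h0 : 0 ≤ v) (h9 : v ≤ 9) :
    (PySem.Int.toStr v).toList = [Char.ofNat (48 + v.toNat)] := by
  interval_cases v <;> decide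

-- a digit character equals the rendered digit of v iff its value is v
lemma char_eq_digitChar (c : Char) (hc : c.isDigit = true) (v : Int) (h0 : 0 ≤ v) (h9 : v ≤ 9) :
    (c = Char.ofNat (48 + v.toNat)) ↔ pvDigit c = v := by
  have hb : 48 ≤ c.toNat ∧ c.toNat ≤ 57 := by
    simp [Char.isDigit, decide_eq_true_eq] at hc
    exact ⟨hc.1, hc.2⟩
  have hcn := Char.ofNat_toNat c
  obtain ⟨h1, h2⟩ := hb
  interval_cases h3 : c.toNat <;> rw [← hcn] <;> interval_cases v <;> decide

lemma flatMap_singleton_eq_map {α β : Type} (f : α → List β) (g : α → β)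
    (l : List α) (h : ∀ a ∈ l, f a = [g a]) : l.flatMap f = l.map g := by
  induction l with
  | nil => rfl
  | cons a t ih =>
    rw [List.flatMap_cons, List.map_cons, h a (List.mem_cons_self ..),
        ih (fun x hx => h x (List.mem_cons_of_mem _ hx))]
    rfl

-- pointwise values follow the arithmetic progression iff every step is δ (mod 10)
lemma seq_iff_delta (n : Nat) (D : Nat → Int) (hD : ∀ k < n, 0 ≤ D k ∧ D k ≤ 9) (δ : Int)
    (hn : 1 ≤ n) :
    (∀ k < n, D k = (D 0 + δ * k) % 10) ↔
    (∀ i ∈ List.range' 1 (n - 1), (D i - D (i - 1)) % 10 = δ % 10) := by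
  constructor
  · intro h i hi
    rw [List.mem_range'_1] at hi
    have hi1 : 1 ≤ i ∧ i < n := by omega
    have h1 := h i hi1.2
    have h2 := h (i - 1) (by omega)
    have hsub : D 0 + δ * ↑(i - 1) = D 0 + δ * i - δ := by
      have : ((i - 1 : Nat) : Int) = (i : Int) - 1 := by omega
      rw [this]; ring
    rw [h1, h2, hsub]
    omega
  · intro h k hk
    induction k with
    | zero =>
      have := hD 0 hn
      simp
      omega
    | succ k ihk =>
      have hk' : k < n := by omega
      have hDk := ihk hk'
      have hstep := h (k + 1) (by rw [List.mem_range'_1]; omega)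
      have hbk := hD (k + 1) hk
      simp only [Nat.add_sub_cancel] at hstep
      rw [hDk] at hstep
      have hcast : ((k + 1 : Nat) : Int) = (k : Int) + 1 := by push_cast; ring
      rw [hcast, mul_add, mul_one]
      omega

-- equality with the generated candidate string ⟺ every adjacent step is δ mod 10
lemma eq_map_range_iff {α : Type} (l : List α) (f : Nat → α) :
    (l = (List.range l.length).map f) ↔ ∀ (k : Nat) (h : k < l.length), l[k]'h = f k := by
  constructor
  · intro he k hk
    rw [List.getElem_of_eq he hk]
    simp
  · intro h
    apply List.ext_getElem (by simp)
    intro i h1 h2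
    simp [h i h1]

lemma eq_gen_iff (l : List Char) (hd : ∀ c ∈ l, c.isDigit = true) (hn : 6 ≤ l.length) (δ : Int) :
    (l = (List.range l.length).flatMap
          (fun (k : Nat) => (PySem.Int.toStr (PySem.Int.mod (pvDigit (l.getD 0 ' ') + δ * (k:Int)) 10)).toList))
    ↔ (∀ i ∈ List.range' 1 (l.length - 1), deltaAt l i = PySem.Int.mod δ 10) := by
  have hDb : ∀ k < l.length, 0 ≤ pvDigit (l.getD k ' ') ∧ pvDigit (l.getD k ' ') ≤ 9 := by
    intro k hk
    exact pvDigit_bounds _ (hd _ (by rw [List.getD_eq_getElem l ' ' hk]; exact List.getElem_mem _))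
  have hvb : ∀ k : Nat, 0 ≤ (pvDigit (l.getD 0 ' ') + δ * (k:Int)) % 10 ∧
      (pvDigit (l.getD 0 ' ') + δ * (k:Int)) % 10 ≤ 9 := by
    intro k
    have h1 := Int.emod_nonneg (pvDigit (l.getD 0 ' ') + δ * (k:Int)) (show (10:Int) ≠ 0 by norm_num)
    have h2 := Int.emod_lt_of_pos (pvDigit (l.getD 0 ' ') + δ * (k:Int)) (show (0:Int) < 10 by norm_num)
    omega
  have hmap : (List.range l.length).flatMap
        (fun (k : Nat) => (PySem.Int.toStr (PySem.Int.mod (pvDigit (l.getD 0 ' ') + δ * (k:Int)) 10)).toList)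
      = (List.range l.length).map
        (fun (k : Nat) => Char.ofNat (48 + ((pvDigit (l.getD 0 ' ') + δ * (k:Int)) % 10).toNat)) := by
    apply flatMap_singleton_eq_map
    intro k _
    rw [mod10]
    exact toStr_digit _ (hvb k).1 (hvb k).2
  have hbridge : ∀ (k : Nat) (hk : k < l.length),
      (l[k]'hk = Char.ofNat (48 + ((pvDigit (l.getD 0 ' ') + δ * (k:Int)) % 10).toNat))
      ↔ pvDigit (l.getD k ' ') = (pvDigit (l.getD 0 ' ') + δ * (k:Int)) % 10 := by
    intro k hk
    have hdig : (l[k]'hk).isDigit = true := hd _ (List.getElem_mem _)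
    rw [List.getD_eq_getElem l ' ' hk]
    exact char_eq_digitChar _ hdig _ (hvb k).1 (hvb k).2
  rw [hmap, eq_map_range_iff]
  rw [show (∀ (k : Nat) (h : k < l.length),
        l[k]'h = Char.ofNat (48 + ((pvDigit (l.getD 0 ' ') + δ * (k:Int)) % 10).toNat))
      ↔ (∀ k < l.length, pvDigit (l.getD k ' ') = (pvDigit (l.getD 0 ' ') + δ * (k:Int)) % 10) from
    ⟨fun h k hk => (hbridge k hk).mp (h k hk), fun h k hk => (hbridge k hk).mpr (h k hk)⟩]
  rw [seq_iff_delta l.length (fun k => pvDigit (l.getD k ' ')) hDb δ (by omega)]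
  simp only [deltaAt, mod10]

-- ===== VERDICT (by name: the statement is the Claim_ definition above) =====
theorem is_sequential_py_spec : Claim_equal_is_sequential_py := by
  intro digits _ hpre
  unfold Spec_is_sequential_py is_sequential_py is_sequential_py_alt
  set l := digits.toList with hl
  by_cases hlen : l.length < 6
  · simp [hlen]
  · have hdig : ∀ c ∈ l, c.isDigit = true := by
      rcases hpre with h | h
      · exact absurd h hlen
      · exact List.all_eq_true.mp h
    have hn6 : 6 ≤ l.length := by omega
    have hb : ∀ i ∈ List.range' 1 (l.length - 1),
        (0 ≤ pvDigit (l.getD i ' ') ∧ pvDigit (l.getD i ' ') ≤ 9) ∧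
        (0 ≤ pvDigit (l.getD (i - 1) ' ') ∧ pvDigit (l.getD (i - 1) ' ') ≤ 9) := by
      intro i hi
      rw [List.mem_range'_1] at hi
      have hi1 : i < l.length := by omega
      have hi2 : i - 1 < l.length := by omega
      constructor
      · exact pvDigit_bounds _ (hdig _ (by rw [List.getD_eq_getElem l ' ' hi1]; exact List.getElem_mem _))
      · exact pvDigit_bounds _ (hdig _ (by rw [List.getD_eq_getElem l ' ' hi2]; exact List.getElem_mem _))
    simp only [hlen, if_false]
    rw [loopA_eq l _ hb]
    have hasc := eq_gen_iff l hdig hn6 1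
    have hdesc := eq_gen_iff l hdig hn6 (-1)
    have hm1 : PySem.Int.mod (1 : Int) 10 = 1 := by decide
    have hm9 : PySem.Int.mod (-1 : Int) 10 = 9 := by decide
    rw [hm1] at hasc
    rw [hm9] at hdesc
    simp only [one_mul] at hasc
    simp only [neg_mul, one_mul, ← sub_eq_add_neg] at hdesc
    have ba : (l == (List.range l.length).flatMap
        (fun (k : Nat) => (PySem.Int.toStr (PySem.Int.mod (pvDigit (l.getD 0 ' ') + (k:Int)) 10)).toList))
        = (List.range' 1 (l.length - 1)).all (fun i => deltaAt l i == 1) := by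
      refine Bool.eq_iff_iff.mpr ?_
      rw [beq_iff_eq, List.all_eq_true, hasc]
      constructor <;> intro h i hi <;> have := h i hi <;> simp_all
    have bd : (l == (List.range l.length).flatMap
        (fun (k : Nat) => (PySem.Int.toStr (PySem.Int.mod (pvDigit (l.getD 0 ' ') - (k:Int)) 10)).toList))
        = (List.range' 1 (l.length - 1)).all (fun i => deltaAt l i == 9) := by
      refine Bool.eq_iff_iff.mpr ?_
      rw [beq_iff_eq, List.all_eq_true, hdesc]
      constructor <;> intro h i hi <;> have := h i hi <;> simp_all
    simp only [ba, bd]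
    cases (List.range' 1 (l.length - 1)).all (fun i => deltaAt l i == 1) <;>
      cases (List.range' 1 (l.length - 1)).all (fun i => deltaAt l i == 9) <;> simp
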